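-- pv_equiv track=rewrite | github.com/js4ngu/NTT-study | ntt_ref,.py | transform
-- ===== SOURCE A (Python) =====
-- from typing import List, Tuple
--
-- def transform(invec: List[int], root: int, mod: int) -> List[int]:
-- 	outvec: List[int] = []
-- 	for i in range(len(invec)):
-- 		temp: int = 0
-- 		for (j, val) in enumerate(invec):
-- 			temp += val * pow(root, i * j, mod)
-- 			temp %= mod
-- 		outvec.append(temp)
-- 	return outvec
-- ===== SOURCE B (Python) =====
-- def transform(invec, root, mod):
--     out = []
--     n = len(invec)
--     for i in range(n):
--         x = pow(root, i, mod)
--         acc = 0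
--         for v in reversed(invec):
--             acc = (acc * x + v) % mod
--         out.append(acc)
--     return out
-- ===== Notes on version B (the rewrite author's own statement) =====
-- stated objective: faster
-- what changed: Replaces the per-cell modular exponentiation pow(root, i*j, mod) in the inner sum with a single pow(root, i, mod) per row followed by a Horner-rule evaluation of the polynomial with coefficients invec.
import Mathlib
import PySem

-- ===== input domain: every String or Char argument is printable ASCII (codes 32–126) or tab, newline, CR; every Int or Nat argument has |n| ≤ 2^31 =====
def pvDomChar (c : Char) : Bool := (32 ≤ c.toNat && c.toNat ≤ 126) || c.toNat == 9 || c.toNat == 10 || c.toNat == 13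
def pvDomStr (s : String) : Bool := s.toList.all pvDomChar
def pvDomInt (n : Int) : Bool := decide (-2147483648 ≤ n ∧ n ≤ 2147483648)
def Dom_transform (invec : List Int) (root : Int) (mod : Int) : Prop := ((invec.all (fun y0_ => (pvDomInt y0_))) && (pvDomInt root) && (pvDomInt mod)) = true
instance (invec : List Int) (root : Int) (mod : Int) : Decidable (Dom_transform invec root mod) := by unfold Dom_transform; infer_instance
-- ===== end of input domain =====

-- B replaces the per-cell modular exponentiation with one pow per row plus a Horner-rule
-- evaluation of the input polynomial; proved to return the same list on every input where
-- the Python A returns (mod ≠ 0, or empty input).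


-- ===== PORT A =====
-- pow(root, i*j, mod): exponents here are i : Nat times an enumerate index j ≥ 0,
-- so `(i * p.1.toNat)` is exactly Python's nonnegative exponent i*j.
def transform (invec : List Int) (root : Int) (mod : Int) : List Int :=
  (List.range invec.length).foldl
    (fun outvec i =>
      outvec ++
        [(PySem.List.enumerate invec).foldl
          (fun temp p =>
            PySem.Int.mod (temp + p.2 * PySem.Int.powMod root (i * p.1.toNat) mod) mod)
          0])
    []

-- ===== PORT B =====
def transform_alt (invec : List Int) (root : Int) (mod : Int) : List Int :=
  (List.range invec.length).map
    (fun i =>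
      let x := PySem.Int.powMod root i mod
      invec.reverse.foldl (fun acc v => PySem.Int.mod (acc * x + v) mod) 0)

-- ===== PRECONDITION & SPEC =====
-- Pre_ excludes exactly the inputs where Python raises: pow(_, _, 0) is a ValueError,
-- reached whenever invec is nonempty and mod = 0 (both A and B raise there).
def Pre_transform (invec : List Int) (root : Int) (mod : Int) : Prop :=
  invec = [] ∨ mod ≠ 0

instance (invec : List Int) (root : Int) (mod : Int) : Decidable (Pre_transform invec root mod) := by
  unfold Pre_transform; infer_instance

def pvWitness_transform : List Int × Int × Int := ([1, 4, 0, 2], 3, 5)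

def Spec_transform (invec : List Int) (root : Int) (mod : Int) (out : List Int) : Prop :=
  out = transform_alt invec root mod

instance (invec : List Int) (root : Int) (mod : Int) (out : List Int) : Decidable (Spec_transform invec root mod out) := by
  unfold Spec_transform; infer_instance

-- ===== CLAIM (what is proved, stated in full; the proofs are below) =====
def Claim_equal_transform : Prop := ∀ (invec : List Int) (root : Int) (mod : Int), Dom_transform invec root mod → Pre_transform invec root mod → Spec_transform invec root mod (transform invec root mod)

-- ===== LEMMAS AND PROOFS =====

-- ∑ j, l[j] * x^j, written Horner-style
def polyv : List Int → Int → Int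
  | [], _ => 0
  | v :: t, x => v + x * polyv t x

theorem fmod_modEq (a m : Int) : Int.fmod a m ≡ a [ZMOD m] := by
  have h : a - Int.fmod a m = m * a.fdiv m := by rw [Int.fmod_def]; ring
  exact Int.ModEq.symm (Int.modEq_iff_dvd.mpr ⟨-(a.fdiv m), by linarith [h]⟩)

theorem fmod_congr {a b m : Int} (h : a ≡ b [ZMOD m]) : Int.fmod a m = Int.fmod b m := by
  rw [Int.fmod_eq_emod, Int.fmod_eq_emod]
  rw [Int.ModEq] at h
  rw [h]
  have hiff : m ∣ a ↔ m ∣ b := by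
    constructor <;> intro hd
    · exact Int.dvd_of_emod_eq_zero (by rw [← h]; exact Int.emod_eq_zero_of_dvd hd)
    · exact Int.dvd_of_emod_eq_zero (by rw [h]; exact Int.emod_eq_zero_of_dvd hd)
  simp [hiff]

theorem polyv_modEq (l : List Int) {x y m : Int} (h : x ≡ y [ZMOD m]) :
    polyv l x ≡ polyv l y [ZMOD m] := by
  induction l with
  | nil => rfl
  | cons v t ih => exact Int.ModEq.add_left v (h.mul ih)

-- B's inner loop (Horner over the reversed list) computes fmod (polyv invec x) m
theorem horner_fold (l : List Int) (x m : Int) :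
    l.reverse.foldl (fun acc v => PySem.Int.mod (acc * x + v) m) 0
      = Int.fmod (polyv l x) m := by
  rw [List.foldl_reverse]
  induction l with
  | nil => simp [polyv, PySem.Int.mod]
  | cons v t ih =>
    simp only [List.foldr_cons]
    rw [ih]
    simp only [PySem.Int.mod, polyv]
    apply fmod_congr
    calc Int.fmod (polyv t x) m * x + v
        ≡ polyv t x * x + v [ZMOD m] := Int.ModEq.add_right v ((fmod_modEq _ _).mul_right x)
      _ = v + x * polyv t x := by ring

-- A's inner loop, generalized over the enumerate offset and the accumulated value
theorem foldA (root m : Int) (i : Nat) :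
    ∀ (l : List Int) (k : Nat) (T : Int),
    (PySem.List.enumerate l (k : Int)).foldl
        (fun temp p =>
          PySem.Int.mod (temp + p.2 * PySem.Int.powMod root (i * p.1.toNat) m) m)
        (Int.fmod T m)
      = Int.fmod (T + root ^ (i * k) * polyv l (root ^ i)) m := by
  intro l
  induction l with
  | nil =>
    intro k T
    simp [PySem.List.enumerate, polyv]
  | cons v t ih =>
    intro k T
    simp only [PySem.List.enumerate, List.foldl_cons]
    have hstep : PySem.Int.mod (Int.fmod T m + v * PySem.Int.powMod root (i * ((k : Int)).toNat) m) m
        = Int.fmod (T + v * root ^ (i * k)) m := by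
      simp only [PySem.Int.mod, PySem.Int.powMod, Int.toNat_natCast]
      exact fmod_congr (((fmod_modEq T m).add ((fmod_modEq _ m).mul_left v)))
    rw [hstep]
    have hcast : ((k : Int) + 1) = ((k + 1 : Nat) : Int) := by push_cast; ring
    rw [hcast, ih (k + 1) (T + v * root ^ (i * k))]
    congr 1
    rw [show i * (k + 1) = i * k + i from by ring, pow_add, polyv]
    ring

-- ===== VERDICT (by name: the statement is the Claim_ definition above) =====
theorem transform_spec : Claim_equal_transform := by
  intro invec root m _ _
  show transform invec root m = transform_alt invec root m
  unfold transform transform_alt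
  rw [PySem.List.foldl_append_singleton_eq_map]
  apply List.map_congr_left
  intro i _
  have hA := foldA root m i invec 0 0
  simp only [Nat.cast_zero, Int.zero_fmod, Nat.mul_zero, pow_zero, one_mul, zero_add] at hA
  rw [horner_fold, hA]
  exact (fmod_congr (polyv_modEq invec (by simpa [PySem.Int.powMod, PySem.Int.mod] using fmod_modEq (root ^ i) m))).symm
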